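-- pv_equiv track=rewrite | github.com/DemonKing7398/Messing-With-Python | minion.py | emitter
-- ===== SOURCE A (Python) =====
-- def emitter(alpha,string,alpha_count):
--     for i in range(len(alpha)):
--         for j in range(len(string)):
--             if(alpha[i]==string[j]):
--                 for k in range(j+1,len(string)+1):
--                     vallu=True
--                     word=string[j:k]
--                     for l in range(len(alpha_count)):
--                         if(word==alpha_count[l]):
--                             vallu=False
--                     if(vallu):
--                         alpha_count.append(word)
--     return alpha_count
-- ===== SOURCE B (Python) =====
-- def emitter(alpha, string, alpha_count):
--     # LCP-based dedup: a candidate string[j:k] duplicates an earlier generated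
--     # word iff k-j <= max lcp of suffix_j with suffixes of previously processed
--     # starts; repeated starts contribute nothing, so each start is done once.
--     n = len(string)
--     old = set(alpha_count)
--     starts = []
--     for c in alpha:
--         for j in range(n):
--             if string[j] == c and j not in starts:
--                 lcp = 0
--                 for j2 in starts:
--                     l = 0
--                     while j + l < n and j2 + l < n and string[j + l] == string[j2 + l]:
--                         l += 1
--                     if l > lcp:
--                         lcp = l
--                 starts.append(j)
--                 for k in range(j + lcp + 1, n + 1):
--                     w = string[j:k]
--                     if w not in old:
--                         alpha_count.append(w)
--     return alpha_count
-- ===== Notes on version B (the rewrite author's own statement) =====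
-- stated objective: faster
-- what changed: B replaces A's membership rescan of the growing accumulator for every candidate with an LCP-based algorithm: each start position is processed at most once, and duplicates of generated substrings are eliminated arithmetically (k-j <= max longest-common-prefix of the current suffix with previously processed suffixes), leaving only a set test against the pre-existing alpha_count entries.
import Mathlib
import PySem

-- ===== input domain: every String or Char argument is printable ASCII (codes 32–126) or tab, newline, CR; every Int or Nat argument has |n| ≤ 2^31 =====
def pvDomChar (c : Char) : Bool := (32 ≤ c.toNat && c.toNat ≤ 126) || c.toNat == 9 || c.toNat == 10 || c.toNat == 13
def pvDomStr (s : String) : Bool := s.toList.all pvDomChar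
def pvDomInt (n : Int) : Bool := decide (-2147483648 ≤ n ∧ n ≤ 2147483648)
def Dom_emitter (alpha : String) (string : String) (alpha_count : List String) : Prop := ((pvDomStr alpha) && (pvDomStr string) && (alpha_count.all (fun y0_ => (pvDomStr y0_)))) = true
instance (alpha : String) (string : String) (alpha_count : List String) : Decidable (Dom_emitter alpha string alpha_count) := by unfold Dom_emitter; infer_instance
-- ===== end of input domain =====

-- B replaces A's membership rescan of the growing accumulator by an LCP-based
-- algorithm: each start position is processed once, duplicates of generated
-- substrings are eliminated by a longest-common-prefix bound, and only the
-- pre-existing alpha_count entries need a set test (objective: faster).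
-- Both A and B mutate/return alpha_count in place in Python; the equivalence
-- proved here is about the return value.


-- ===== PORT A =====
def emitter (alpha : String) (string : String) (alpha_count : List String) : List String :=
  (PySem.List.pyRange 0 (PySem.Str.len alpha)).foldl (fun acc i =>
    (PySem.List.pyRange 0 (PySem.Str.len string)).foldl (fun acc j =>
      if PySem.Str.pyGet? alpha i == PySem.Str.pyGet? string j then
        (PySem.List.pyRange (j + 1) (PySem.Str.len string + 1)).foldl (fun acc k =>
          let word := PySem.Str.slice string (some j) (some k)
          let vallu := (PySem.List.pyRange 0 ((acc.length : Int))).foldl (fun v l =>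
            if some word == PySem.List.pyGet? acc l then false else v) true
          if vallu then acc ++ [word] else acc) acc
      else acc) acc) alpha_count

-- ===== PORT B =====
-- the 'while j+l < n and j2+l < n and string[j+l] == string[j2+l]: l += 1' loop of Source B
def lcpLoopB (string : String) (n j j2 l : Int) : Int :=
  if h : j + l < n ∧ j2 + l < n ∧
      PySem.Str.pyGet? string (j + l) = PySem.Str.pyGet? string (j2 + l) then
    lcpLoopB string n j j2 (l + 1)
  else l
termination_by (n - (j + l)).toNat
decreasing_by omega

def emitter_alt (alpha : String) (string : String) (alpha_count : List String) : List String :=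
  let n := PySem.Str.len string
  let old := PySem.Set.ofList alpha_count
  (alpha.toList.foldl (fun (st : List String × List Int) c =>
    (PySem.List.pyRange 0 n).foldl (fun st j =>
      if (PySem.Str.pyGet? string j == some c) && !(st.2.contains j) then
        let lcp := st.2.foldl (fun lcp j2 =>
          let l := lcpLoopB string n j j2 0
          if l > lcp then l else lcp) 0
        ((PySem.List.pyRange (j + lcp + 1) (n + 1)).foldl (fun acc k =>
          let w := PySem.Str.slice string (some j) (some k)
          if PySem.Set.contains old w then acc else acc ++ [w]) st.1,
         st.2 ++ [j])
      else st) st) (alpha_count, ([] : List Int))).1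

-- ===== PRECONDITION & SPEC =====
def Spec_emitter (alpha : String) (string : String) (alpha_count : List String) (out : List String) : Prop := out = emitter_alt alpha string alpha_count
instance (alpha : String) (string : String) (alpha_count : List String) (out : List String) : Decidable (Spec_emitter alpha string alpha_count out) := by unfold Spec_emitter; infer_instance

-- ===== CLAIM (what is proved, stated in full; the proofs are below) =====
def Claim_equal_emitter : Prop := ∀ (alpha : String) (string : String) (alpha_count : List String), Dom_emitter alpha string alpha_count → Spec_emitter alpha string alpha_count (emitter alpha string alpha_count)

-- ===== LEMMAS AND PROOFS =====

-- ascending positions of c in s, starting at offset a (proof-only reference list)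
def posList (c : Char) : List Char → Int → List Int
  | [], _ => []
  | x :: t, a => if x == c then a :: posList c t (a + 1) else posList c t (a + 1)

-- character-wise longest common prefix length (proof-only)
def lcpL : List Char → List Char → Nat
  | a :: x, b :: y => if a = b then lcpL x y + 1 else 0
  | _, _ => 0

-- the word string[j:k]
def W (string : String) (j k : Int) : String := PySem.Str.slice string (some j) (some k)

-- A's inner k-loop after the dedup scan is replaced by the membership test
def kfoldA (string : String) (j : Int) (acc : List String) : List String :=
  (PySem.List.pyRange (j + 1) (PySem.Str.len string + 1)).foldl (fun acc k =>
    if acc.contains (W string j k) then acc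
    else acc ++ [W string j k]) acc

-- B's per-position step after normalisation
def stepB (string : String) (A0 : List String) (st : List String × List Int) (j : Int) :
    List String × List Int :=
  if st.2.contains j then st
  else
    let lcp := st.2.foldl (fun lcp j2 =>
      let l := lcpLoopB string (PySem.Str.len string) j j2 0
      if l > lcp then l else lcp) 0
    ((PySem.List.pyRange (j + lcp + 1) (PySem.Str.len string + 1)).foldl (fun acc k =>
      if PySem.Set.contains (PySem.Set.ofList A0) (W string j k) then acc
      else acc ++ [W string j k]) st.1,
     st.2 ++ [j])

-- simulation invariant between A's accumulator and B's (accumulator, starts) state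
def SimInv (string : String) (A0 acc : List String) (starts : List Int) : Prop :=
  (∀ w ∈ A0, w ∈ acc) ∧
  (∀ w ∈ acc, w ∈ A0 ∨ ∃ j ∈ starts, ∃ k : Int, j < k ∧ k ≤ (string.toList.length : Int) ∧
      w = W string j k) ∧
  (∀ j ∈ starts, 0 ≤ j ∧ j < (string.toList.length : Int) ∧
      ∀ k : Int, j < k → k ≤ (string.toList.length : Int) → W string j k ∈ acc)

-- ---------- generic list lemmas ----------

lemma foldl_fix {α β : Type} (f : β → α → β) (r : List α) (b : β)
    (h : ∀ x ∈ r, f b x = b) : r.foldl f b = b := by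
  induction r with
  | nil => rfl
  | cons x t ih =>
    rw [List.foldl_cons, h x (by simp)]
    exact ih (fun y hy => h y (by simp [hy]))

lemma ite_and_bool {α : Type} (a b : Bool) (x y : α) :
    (if a && b then x else y) = if a then (if b then x else y) else y := by
  cases a <;> simp

lemma ite_not_bool {α : Type} (c : Bool) (x y : α) :
    (if !c then x else y) = if c then y else x := by
  cases c <;> simp

-- ---------- A-side normalisation (range → posList) ----------

lemma range_map_getElem? {α : Type} (l : List α) :
    (List.range l.length).map (fun k => l[k]?) = l.map some := by
  apply List.ext_getElem
  · simp
  · intro i h1 h2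
    simp at h1
    simp [h1]

lemma foldl_range_getElem? {α β : Type} (l : List α) (G : β → Option α → β) (init : β) :
    (List.range l.length).foldl (fun acc k => G acc l[k]?) init
      = l.foldl (fun acc x => G acc (some x)) init := by
  have h := range_map_getElem? l
  calc (List.range l.length).foldl (fun acc k => G acc l[k]?) init
      = ((List.range l.length).map (fun k => l[k]?)).foldl G init := (List.foldl_map ..).symm
    _ = (l.map some).foldl G init := by rw [h]
    _ = l.foldl (fun acc x => G acc (some x)) init := List.foldl_map ..

lemma any_range_getElem? {α : Type} (l : List α) (p : Option α → Bool) :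
    (List.range l.length).any (fun k => p l[k]?) = l.any (fun x => p (some x)) := by
  have h := range_map_getElem? l
  calc (List.range l.length).any (fun k => p l[k]?)
      = ((List.range l.length).map (fun k => l[k]?)).any p := (List.any_map).symm
    _ = (l.map some).any p := by rw [h]
    _ = l.any (fun x => p (some x)) := List.any_map

-- A's dedup scan over range(len(acc)) is the membership test
lemma dedup_eq (acc : List String) (word : String) :
    (PySem.List.pyRange 0 ((acc.length : Int))).foldl (fun v l =>
      if some word == PySem.List.pyGet? acc l then false else v) true
      = !acc.contains word := by
  rw [PySem.List.pyRange_zero_natCast, List.foldl_map]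
  simp only [PySem.List.pyGet?_natCast]
  rw [PySem.List.foldl_if_false_eq (p := fun k => some word == acc[k]?)]
  rw [show (fun (k : Nat) => some word == acc[k]?)
        = (fun k => (fun o => some word == o) acc[k]?) from rfl,
     any_range_getElem?]
  simp only [Option.some_beq_some ..]
  rw [List.any_beq, List.contains_eq_mem]
  simp

lemma cast_filter_eq (c : Char) (s : List Char) : ∀ a : Int,
    ((List.range s.length).filter (fun k => some c == s[k]?)).map (fun (k : Nat) => (k : Int) + a)
      = posList c s a := by
  induction s with
  | nil => intro a; simp [posList]
  | cons x t ih =>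
    intro a
    simp only [List.length_cons]
    rw [List.range_succ_eq_map]
    by_cases hx : x = c
    · simp [posList, hx, List.filter_map,
        Function.comp_def, ← ih (a + 1)]
      intro k _ _; omega
    · simp [posList, hx, List.filter_cons, List.filter_map,
        Function.comp_def, ← ih (a + 1)]
      rw [if_neg (fun h => hx h.symm), List.map_map]
      apply List.map_congr_left; intro k _; simp; omega

-- A's filtered scan of string for matches of c is the position list
lemma filter_pyRange_eq (s : List Char) (c : Char) :
    (PySem.List.pyRange 0 (s.length : Int)).filter
      (fun j => some c == PySem.List.pyGet? s j) = posList c s 0 := by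
  rw [PySem.List.pyRange_zero_natCast, List.filter_map]
  simp only [Function.comp_def, PySem.List.pyGet?_natCast]
  rw [← cast_filter_eq c s 0]
  apply List.map_congr_left; intro k _; omega

lemma innerRaw_eq (string : String) (j : Int) (acc : List String) :
    (PySem.List.pyRange (j + 1) (PySem.Str.len string + 1)).foldl (fun acc k =>
      let word := PySem.Str.slice string (some j) (some k)
      let vallu := (PySem.List.pyRange 0 ((acc.length : Int))).foldl (fun v l =>
        if some word == PySem.List.pyGet? acc l then false else v) true
      if vallu then acc ++ [word] else acc) acc = kfoldA string j acc := by
  unfold kfoldA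
  apply PySem.List.foldl_congr_mem
  intro acc k _
  simp only [dedup_eq]
  simp [W]

lemma middle_eq (string : String) (ch : Char) (acc : List String) :
    (PySem.List.pyRange 0 (PySem.Str.len string)).foldl (fun acc j =>
      if some ch == PySem.Str.pyGet? string j then kfoldA string j acc else acc) acc
    = (posList ch string.toList 0).foldl (fun acc j => kfoldA string j acc) acc := by
  rw [PySem.List.foldl_if_eq_foldl_filter (p := fun j => some ch == PySem.Str.pyGet? string j)
        (f := fun acc j => kfoldA string j acc)]
  congr 1
  rw [PySem.Str.len_eq]
  rw [← filter_pyRange_eq string.toList ch]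
  apply List.filter_congr
  intro j _
  simp

-- A rewritten as a fold over alpha's characters and the position lists
lemma emitter_eq (alpha string : String) (acc : List String) :
    emitter alpha string acc
      = alpha.toList.foldl (fun acc ch =>
          (posList ch string.toList 0).foldl (fun acc j => kfoldA string j acc) acc) acc := by
  unfold emitter
  rw [PySem.Str.len_eq alpha, PySem.List.pyRange_zero_natCast, List.foldl_map]
  simp only [PySem.Str.pyGet?_natCast]
  rw [foldl_range_getElem? (l := alpha.toList)
      (G := fun acc o => (PySem.List.pyRange 0 (PySem.Str.len string)).foldl (fun acc j =>
        if o == PySem.Str.pyGet? string j then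
          (PySem.List.pyRange (j + 1) (PySem.Str.len string + 1)).foldl (fun acc k =>
            let word := PySem.Str.slice string (some j) (some k)
            let vallu := (PySem.List.pyRange 0 ((acc.length : Int))).foldl (fun v l =>
              if some word == PySem.List.pyGet? acc l then false else v) true
            if vallu then acc ++ [word] else acc) acc
        else acc) acc)]
  simp only [innerRaw_eq, middle_eq]

-- ---------- B-side normalisation ----------

lemma filter_pyRange_eq' (s : List Char) (c : Char) :
    (PySem.List.pyRange 0 (s.length : Int)).filter
      (fun j => PySem.List.pyGet? s j == some c) = posList c s 0 := by
  rw [← filter_pyRange_eq s c]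
  apply List.filter_congr
  intro j _
  apply Bool.eq_iff_iff.mpr
  simp only [beq_iff_eq]
  exact eq_comm

-- B rewritten as a fold over alpha's characters and the position lists of stepB
lemma emitter_alt_eq (alpha string : String) (A0 : List String) :
    emitter_alt alpha string A0
      = (alpha.toList.foldl (fun st ch =>
          (posList ch string.toList 0).foldl (stepB string A0) st) (A0, ([] : List Int))).1 := by
  unfold emitter_alt
  dsimp only
  congr 1
  apply PySem.List.foldl_congr_mem
  intro st c _
  rw [show (fun (st : List String × List Int) (j : Int) =>
        if (PySem.Str.pyGet? string j == some c) && !(st.2.contains j) then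
          ((PySem.List.pyRange (j + (st.2.foldl (fun lcp j2 =>
              if lcpLoopB string (PySem.Str.len string) j j2 0 > lcp then
                lcpLoopB string (PySem.Str.len string) j j2 0 else lcp) 0) + 1)
              (PySem.Str.len string + 1)).foldl (fun acc k =>
            if PySem.Set.contains (PySem.Set.ofList A0) (PySem.Str.slice string (some j) (some k))
              then acc else acc ++ [PySem.Str.slice string (some j) (some k)]) st.1,
           st.2 ++ [j])
        else st)
      = (fun st j => if PySem.Str.pyGet? string j == some c then
          (if st.2.contains j then st else
            ((PySem.List.pyRange (j + (st.2.foldl (fun lcp j2 =>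
                if lcpLoopB string (PySem.Str.len string) j j2 0 > lcp then
                  lcpLoopB string (PySem.Str.len string) j j2 0 else lcp) 0) + 1)
                (PySem.Str.len string + 1)).foldl (fun acc k =>
              if PySem.Set.contains (PySem.Set.ofList A0) (PySem.Str.slice string (some j) (some k))
                then acc else acc ++ [PySem.Str.slice string (some j) (some k)]) st.1,
             st.2 ++ [j]))
          else st) from by
        funext st j
        rw [ite_and_bool, ite_not_bool]]
  rw [PySem.List.foldl_if_eq_foldl_filter
        (p := fun j => PySem.Str.pyGet? string j == some c)]
  have hfilter : (PySem.List.pyRange 0 (PySem.Str.len string)).filter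
      (fun j => PySem.Str.pyGet? string j == some c) = posList c string.toList 0 := by
    rw [PySem.Str.len_eq, ← filter_pyRange_eq' string.toList c]
    apply List.filter_congr
    intro j _
    simp
  rw [hfilter]
  apply PySem.List.foldl_congr_mem
  intro st j _
  simp only [stepB, W]

-- ---------- substring (slice) facts ----------

lemma W_toList (string : String) (j k : Int) (hj : 0 ≤ j) (hk : 0 ≤ k) :
    (W string j k).toList = (string.toList.drop j.toNat).take (k.toNat - j.toNat) := by
  rw [W, PySem.Str.toList_slice, PySem.Chars.slice_eq_listSlice, PySem.List.slice_toNat _ hj hk]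

lemma W_length (string : String) (j k : Int) (hj : 0 ≤ j) (hjk : j ≤ k)
    (hk : k ≤ (string.toList.length : Int)) :
    (W string j k).toList.length = k.toNat - j.toNat := by
  rw [W_toList string j k hj (by omega), List.length_take, List.length_drop]
  omega

lemma string_eq_of_toList (s t : String) (h : s.toList = t.toList) : s = t :=
  String.toList_inj.mp h

-- ---------- lcp facts ----------

lemma lcpL_le_left (x y : List Char) : lcpL x y ≤ x.length := by
  induction x generalizing y with
  | nil => simp [lcpL]
  | cons a x ih =>
    cases y with
    | nil => simp [lcpL]
    | cons b y =>
      by_cases h : a = b <;> simp [lcpL, h]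
      exact ih y

lemma lcpL_le_right (x y : List Char) : lcpL x y ≤ y.length := by
  induction x generalizing y with
  | nil => simp [lcpL]
  | cons a x ih =>
    cases y with
    | nil => simp [lcpL]
    | cons b y =>
      by_cases h : a = b
      · simp only [lcpL, if_pos h, List.length_cons]
        exact Nat.succ_le_succ (ih y)
      · simp [lcpL, h]

lemma take_eq_of_le_lcpL (x y : List Char) (m : Nat) (h : m ≤ lcpL x y) :
    x.take m = y.take m := by
  induction x generalizing y m with
  | nil =>
    cases y <;> simp [lcpL] at h <;> simp [h]
  | cons a x ih =>
    cases y with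
    | nil => simp [lcpL] at h; simp [h]
    | cons b y =>
      by_cases hab : a = b
      · cases m with
        | zero => simp
        | succ m =>
          simp [lcpL, hab] at h
          simp [hab, List.take_succ_cons, ih y m h]
      · simp [lcpL, hab] at h; simp [h]

lemma le_lcpL_of_take_eq (x y : List Char) (m : Nat) (h : x.take m = y.take m)
    (hm : m ≤ x.length) : m ≤ lcpL x y := by
  induction x generalizing y m with
  | nil => simp at hm; omega
  | cons a x ih =>
    cases m with
    | zero => omega
    | succ m =>
      cases y with
      | nil => simp at h
      | cons b y =>
        simp [List.take_succ_cons] at h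
        simp at hm
        have := ih y m h.2 hm
        simp [lcpL, h.1]
        omega

-- common prefixes of suffixes are equal words
lemma W_eq_of_le_lcp (string : String) (j j2 k : Int) (hj : 0 ≤ j) (hj2 : 0 ≤ j2)
    (hjk : j < k)
    (hlcp : k - j ≤ (lcpL (string.toList.drop j.toNat) (string.toList.drop j2.toNat) : Int)) :
    W string j k = W string j2 (j2 + (k - j)) := by
  apply string_eq_of_toList
  rw [W_toList string j k hj (by omega), W_toList string j2 (j2 + (k - j)) hj2 (by omega)]
  have h1 : k.toNat - j.toNat = (k - j).toNat := by omega
  have h2 : (j2 + (k - j)).toNat - j2.toNat = (k - j).toNat := by omega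
  rw [h1, h2]
  exact take_eq_of_le_lcpL _ _ _ (by omega)

-- equal words starting at j and j2 force a long common prefix
lemma le_lcp_of_W_eq (string : String) (j j2 k k2 : Int) (hj : 0 ≤ j) (hj2 : 0 ≤ j2)
    (hjk : j < k) (hk : k ≤ (string.toList.length : Int))
    (hjk2 : j2 < k2) (hk2 : k2 ≤ (string.toList.length : Int))
    (heq : W string j k = W string j2 k2) :
    k - j ≤ (lcpL (string.toList.drop j.toNat) (string.toList.drop j2.toNat) : Int) := by
  have hlen := congrArg (fun s => s.toList.length) heq
  simp only at hlen
  rw [W_length string j k hj (by omega) hk, W_length string j2 k2 hj2 (by omega) hk2] at hlen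
  have htl := congrArg String.toList heq
  rw [W_toList string j k hj (by omega), W_toList string j2 k2 hj2 (by omega)] at htl
  have hm : k2.toNat - j2.toNat = k.toNat - j.toNat := by omega
  rw [hm] at htl
  have := le_lcpL_of_take_eq _ _ (k.toNat - j.toNat) htl (by rw [List.length_drop]; omega)
  omega

-- lengths of equal words agree
lemma W_len_eq_of_eq (string : String) (j j2 k k2 : Int) (hj : 0 ≤ j) (hj2 : 0 ≤ j2)
    (hjk : j ≤ k) (hk : k ≤ (string.toList.length : Int))
    (hjk2 : j2 ≤ k2) (hk2 : k2 ≤ (string.toList.length : Int))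
    (heq : W string j k = W string j2 k2) : k - j = k2 - j2 := by
  have hlen := congrArg (fun s => s.toList.length) heq
  simp only at hlen
  rw [W_length string j k hj hjk hk, W_length string j2 k2 hj2 hjk2 hk2] at hlen
  omega

-- ---------- lcpLoopB computes lcpL ----------

lemma lcpLoopB_eq (string : String) (j j2 : Int) (hj : 0 ≤ j) (hj2 : 0 ≤ j2) :
    ∀ l : Int, 0 ≤ l →
      lcpLoopB string (string.toList.length : Int) j j2 l
        = l + (lcpL (string.toList.drop (j + l).toNat) (string.toList.drop (j2 + l).toNat) : Int) := by
  suffices H : ∀ (fuel : Nat) (l : Int), 0 ≤ l →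
      (((string.toList.length : Int) - (j + l)).toNat ≤ fuel) →
      lcpLoopB string (string.toList.length : Int) j j2 l
        = l + (lcpL (string.toList.drop (j + l).toNat)
            (string.toList.drop (j2 + l).toNat) : Int) by
    intro l hl
    exact H _ l hl le_rfl
  intro fuel
  induction fuel with
  | zero =>
    intro l hl hf
    rw [lcpLoopB]
    rw [dif_neg (by intro h; omega)]
    have hd : string.toList.drop (j + l).toNat = [] :=
      List.drop_eq_nil_of_le (by omega)
    rw [hd]
    have : lcpL [] (string.toList.drop (j2 + l).toNat) = 0 := rfl
    rw [this]
    omega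
  | succ fuel ih =>
    intro l hl hf
    rw [lcpLoopB]
    by_cases h : j + l < (string.toList.length : Int) ∧ j2 + l < (string.toList.length : Int) ∧
        PySem.Str.pyGet? string (j + l) = PySem.Str.pyGet? string (j2 + l)
    · rw [dif_pos h]
      obtain ⟨h1, h2, h3⟩ := h
      have hlt1 : (j + l).toNat < string.toList.length := by omega
      have hlt2 : (j2 + l).toNat < string.toList.length := by omega
      rw [show j + l = (((j + l).toNat : Nat) : Int) by omega,
          show j2 + l = (((j2 + l).toNat : Nat) : Int) by omega] at h3
      simp only [PySem.Str.pyGet?_natCast] at h3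
      rw [List.getElem?_eq_getElem hlt1, List.getElem?_eq_getElem hlt2] at h3
      have hch : string.toList[(j + l).toNat] = string.toList[(j2 + l).toNat] := by
        exact Option.some.inj h3
      rw [ih (l + 1) (by omega) (by omega)]
      rw [List.drop_eq_getElem_cons hlt1, List.drop_eq_getElem_cons hlt2]
      have : lcpL (string.toList[(j + l).toNat] :: string.toList.drop ((j + l).toNat + 1))
          (string.toList[(j2 + l).toNat] :: string.toList.drop ((j2 + l).toNat + 1))
          = lcpL (string.toList.drop ((j + l).toNat + 1))
              (string.toList.drop ((j2 + l).toNat + 1)) + 1 := by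
        rw [lcpL, if_pos hch]
      rw [this]
      have e1 : (j + (l + 1)).toNat = (j + l).toNat + 1 := by omega
      have e2 : (j2 + (l + 1)).toNat = (j2 + l).toNat + 1 := by omega
      rw [e1, e2]
      push_cast
      ring
    · rw [dif_neg h]
      by_cases hb1 : j + l < (string.toList.length : Int)
      · by_cases hb2 : j2 + l < (string.toList.length : Int)
        · -- both in range, so the characters must differ
          have hlt1 : (j + l).toNat < string.toList.length := by omega
          have hlt2 : (j2 + l).toNat < string.toList.length := by omega
          have hne : string.toList[(j + l).toNat] ≠ string.toList[(j2 + l).toNat] := by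
            intro he
            apply h
            refine ⟨hb1, hb2, ?_⟩
            rw [show j + l = (((j + l).toNat : Nat) : Int) by omega,
                show j2 + l = (((j2 + l).toNat : Nat) : Int) by omega]
            simp only [PySem.Str.pyGet?_natCast]
            rw [List.getElem?_eq_getElem hlt1, List.getElem?_eq_getElem hlt2, he]
          rw [List.drop_eq_getElem_cons hlt1, List.drop_eq_getElem_cons hlt2]
          have : lcpL (string.toList[(j + l).toNat] :: string.toList.drop ((j + l).toNat + 1))
              (string.toList[(j2 + l).toNat] :: string.toList.drop ((j2 + l).toNat + 1)) = 0 := by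
            rw [lcpL, if_neg hne]
          rw [this]
          omega
        · have hd : string.toList.drop (j2 + l).toNat = [] :=
            List.drop_eq_nil_of_le (by omega)
          rw [hd]
          have : lcpL (string.toList.drop (j + l).toNat) [] = 0 := by
            cases string.toList.drop (j + l).toNat <;> rfl
          rw [this]
          omega
      · have hd : string.toList.drop (j + l).toNat = [] :=
          List.drop_eq_nil_of_le (by omega)
        rw [hd]
        have : lcpL [] (string.toList.drop (j2 + l).toNat) = 0 := rfl
        rw [this]
        omega

-- B's running max over starts
lemma maxfold_spec (f : Int → Int) (l : List Int) :
    ∀ a : Int, a ≤ l.foldl (fun m x => if f x > m then f x else m) a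
      ∧ (∀ x ∈ l, f x ≤ l.foldl (fun m x => if f x > m then f x else m) a)
      ∧ (l.foldl (fun m x => if f x > m then f x else m) a = a
          ∨ ∃ x ∈ l, l.foldl (fun m x => if f x > m then f x else m) a = f x) := by
  induction l with
  | nil => intro a; simp
  | cons x t ih =>
    intro a
    rw [List.foldl_cons]
    by_cases hfa : f x > a
    · rw [if_pos hfa]
      obtain ⟨h1, h2, h3⟩ := ih (f x)
      refine ⟨by omega, ?_, ?_⟩
      · intro y hy
        rcases List.mem_cons.1 hy with rfl | hy
        · exact h1
        · exact h2 y hy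
      · rcases h3 with h3 | ⟨y, hy, h3⟩
        · exact Or.inr ⟨x, by simp, h3⟩
        · exact Or.inr ⟨y, by simp [hy], h3⟩
    · rw [if_neg hfa]
      obtain ⟨h1, h2, h3⟩ := ih a
      refine ⟨h1, ?_, ?_⟩
      · intro y hy
        rcases List.mem_cons.1 hy with rfl | hy
        · omega
        · exact h2 y hy
      · rcases h3 with h3 | ⟨y, hy, h3⟩
        · exact Or.inl h3
        · exact Or.inr ⟨y, by simp [hy], h3⟩

-- ---------- generic facts about the contains/append fold ----------

lemma foldCA_mono (r : List Int) (g : Int → String) (x : String) :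
    ∀ acc, x ∈ acc →
      x ∈ r.foldl (fun ac k => if ac.contains (g k) then ac else ac ++ [g k]) acc := by
  induction r with
  | nil => intro acc h; exact h
  | cons k t ih =>
    intro acc h
    rw [List.foldl_cons]
    split
    · exact ih acc h
    · exact ih _ (by simp [h])

lemma foldCA_sub (r : List Int) (g : Int → String) (x : String) :
    ∀ acc, x ∈ r.foldl (fun ac k => if ac.contains (g k) then ac else ac ++ [g k]) acc →
      x ∈ acc ∨ ∃ k ∈ r, x = g k := by
  induction r with
  | nil => intro acc h; exact Or.inl h
  | cons k t ih =>
    intro acc h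
    rw [List.foldl_cons] at h
    split at h
    · rcases ih acc h with h | ⟨k', hk', rfl⟩
      · exact Or.inl h
      · exact Or.inr ⟨k', by simp [hk'], rfl⟩
    · rcases ih _ h with h | ⟨k', hk', rfl⟩
      · rcases List.mem_append.1 h with h | h
        · exact Or.inl h
        · exact Or.inr ⟨k, by simp, by simpa using h⟩
      · exact Or.inr ⟨k', by simp [hk'], rfl⟩

lemma foldCA_adds (r : List Int) (g : Int → String) (k : Int) (hk : k ∈ r) :
    ∀ acc, g k ∈ r.foldl (fun ac k => if ac.contains (g k) then ac else ac ++ [g k]) acc := by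
  induction r with
  | nil => simp at hk
  | cons k0 t ih =>
    intro acc
    rw [List.foldl_cons]
    rcases List.mem_cons.1 hk with rfl | hk
    · split
      · next hc => exact foldCA_mono t g (g k) _ (by simpa [List.contains_eq_mem] using hc)
      · exact foldCA_mono t g (g k) _ (by simp)
    · exact ih hk _

-- ---------- main per-step simulation ----------

-- phase 2: with the accumulator's membership decided by A0 alone, A's contains-fold
-- equals B's set-test fold
lemma phase2 (string : String) (A0 acc : List String) (j L : Int)
    (hchar : ∀ k : Int, j + L < k → k ≤ (string.toList.length : Int) →
      (W string j k ∈ acc ↔ W string j k ∈ A0))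
    (hj : 0 ≤ j) (hL : 0 ≤ L) :
    ∀ a : Int, j + L < a →
      ∀ extra : List String,
        (∀ w ∈ extra, ∃ k : Int, j + L < k ∧ k < a ∧ k ≤ (string.toList.length : Int) ∧
          w = W string j k) →
      (PySem.List.pyRange a ((string.toList.length : Int) + 1)).foldl
          (fun ac k => if ac.contains (W string j k) then ac else ac ++ [W string j k])
          (acc ++ extra)
        = acc ++ (PySem.List.pyRange a ((string.toList.length : Int) + 1)).foldl
            (fun ac k => if PySem.Set.contains (PySem.Set.ofList A0) (W string j k) then ac
              else ac ++ [W string j k]) extra := by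
  suffices H : ∀ (fuel : Nat) (a : Int), j + L < a →
      (((string.toList.length : Int) + 1 - a).toNat ≤ fuel) →
      ∀ extra : List String,
        (∀ w ∈ extra, ∃ k : Int, j + L < k ∧ k < a ∧ k ≤ (string.toList.length : Int) ∧
          w = W string j k) →
      (PySem.List.pyRange a ((string.toList.length : Int) + 1)).foldl
          (fun ac k => if ac.contains (W string j k) then ac else ac ++ [W string j k])
          (acc ++ extra)
        = acc ++ (PySem.List.pyRange a ((string.toList.length : Int) + 1)).foldl
            (fun ac k => if PySem.Set.contains (PySem.Set.ofList A0) (W string j k) then ac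
              else ac ++ [W string j k]) extra by
    intro a ha extra hextra
    exact H _ a ha le_rfl extra hextra
  intro fuel
  induction fuel with
  | zero =>
    intro a ha hf extra hextra
    rw [PySem.List.pyRange_one_eq_nil (by omega)]
    rfl
  | succ fuel ih =>
    intro a ha hf extra hextra
    by_cases hab : a < (string.toList.length : Int) + 1
    · rw [PySem.List.pyRange_one_cons hab, List.foldl_cons, List.foldl_cons]
      have hnotextra : W string j a ∉ extra := by
        intro hmem
        obtain ⟨k, hk1, hk2, hk3, hk4⟩ := hextra _ hmem
        have := W_len_eq_of_eq string j j a k hj hj (by omega) (by omega) (by omega) hk3 hk4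
        omega
      have hcont : (acc ++ extra).contains (W string j a) = acc.contains (W string j a) := by
        simp [List.contains_eq_mem, hnotextra]
      by_cases hw : W string j a ∈ A0
      · have h1 : (acc ++ extra).contains (W string j a) = true := by
          rw [hcont]
          simp [List.contains_eq_mem]
          exact (hchar a ha (by omega)).mpr hw
        have h2 : PySem.Set.contains (PySem.Set.ofList A0) (W string j a) = true := by
          simp [PySem.Set.contains, List.contains_eq_mem, PySem.Set.mem_ofList]
          exact hw
        rw [if_pos h1, if_pos h2]
        exact ih (a + 1) (by omega) (by omega) extra
          (fun w hwm => by obtain ⟨k, p1, p2, p3, p4⟩ := hextra w hwm; exact ⟨k, p1, by omega, p3, p4⟩)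
      · have h1 : (acc ++ extra).contains (W string j a) = false := by
          rw [hcont]
          simp [List.contains_eq_mem]
          intro hmem
          exact hw ((hchar a ha (by omega)).mp hmem)
        have h2 : PySem.Set.contains (PySem.Set.ofList A0) (W string j a) = false := by
          simp [PySem.Set.contains, List.contains_eq_mem, PySem.Set.mem_ofList]
          exact hw
        rw [if_neg (by rw [h1]; simp), if_neg (by rw [h2]; simp)]
        rw [List.append_assoc]
        exact ih (a + 1) (by omega) (by omega) (extra ++ [W string j a])
          (fun w hwm => by
            rcases List.mem_append.1 hwm with hwm | hwm
            · obtain ⟨k, p1, p2, p3, p4⟩ := hextra w hwm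
              exact ⟨k, p1, by omega, p3, p4⟩
            · exact ⟨a, ha, by omega, by omega, by simpa using hwm⟩)
    · rw [PySem.List.pyRange_one_eq_nil (by omega)]
      rfl

-- the per-event step: A's kfold equals B's step and the invariant is preserved
lemma stepSim (string : String) (A0 acc : List String) (starts : List Int) (j : Int)
    (hInv : SimInv string A0 acc starts) (hj0 : 0 ≤ j)
    (hjn : j < (string.toList.length : Int)) :
    kfoldA string j acc = (stepB string A0 (acc, starts) j).1
      ∧ SimInv string A0 (kfoldA string j acc) (stepB string A0 (acc, starts) j).2 := by
  have nn : PySem.Str.len string = (string.toList.length : Int) := PySem.Str.len_eq string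
  obtain ⟨hA0, hsub, hstarts⟩ := hInv
  have kdef : kfoldA string j acc
      = (PySem.List.pyRange (j + 1) ((string.toList.length : Int) + 1)).foldl
          (fun ac k => if ac.contains (W string j k) then ac else ac ++ [W string j k]) acc := by
    unfold kfoldA
    rw [nn]
  by_cases hc : starts.contains j = true
  · -- repeated start: A's pass appends nothing, B skips it
    have hjmem : j ∈ starts := by simpa [List.contains_eq_mem] using hc
    have hfix : kfoldA string j acc = acc := by
      rw [kdef]
      apply foldl_fix
      intro k hk
      have hkr := (PySem.List.mem_pyRange_one).1 hk
      have hWmem : W string j k ∈ acc := (hstarts j hjmem).2.2 k (by omega) (by omega)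
      rw [if_pos (by simp [List.contains_eq_mem]; exact hWmem)]
    have hstepB : stepB string A0 (acc, starts) j = (acc, starts) := by
      unfold stepB
      rw [if_pos hc]
    rw [hstepB, hfix]
    exact ⟨rfl, hA0, hsub, hstarts⟩
  · -- fresh start
    have hcf : starts.contains j = false := by simpa using hc
    have hLrw : starts.foldl (fun lcp j2 =>
          if lcpLoopB string (string.toList.length : Int) j j2 0 > lcp then
            lcpLoopB string (string.toList.length : Int) j j2 0 else lcp) 0
        = starts.foldl (fun lcp j2 =>
          if ((lcpL (string.toList.drop j.toNat) (string.toList.drop j2.toNat) : Nat) : Int) > lcp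
          then ((lcpL (string.toList.drop j.toNat) (string.toList.drop j2.toNat) : Nat) : Int)
          else lcp) 0 := by
      apply PySem.List.foldl_congr_mem
      intro m j2 hj2mem
      have hj2 : 0 ≤ j2 := (hstarts j2 hj2mem).1
      have he := lcpLoopB_eq string j j2 hj0 hj2 0 le_rfl
      simp only [add_zero, zero_add] at he
      rw [he]
    obtain ⟨hL0, hLge, hLatt⟩ := maxfold_spec
      (fun j2 => ((lcpL (string.toList.drop j.toNat) (string.toList.drop j2.toNat) : Nat) : Int))
      starts 0
    have hLn : starts.foldl (fun lcp j2 =>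
          if ((lcpL (string.toList.drop j.toNat) (string.toList.drop j2.toNat) : Nat) : Int) > lcp
          then ((lcpL (string.toList.drop j.toNat) (string.toList.drop j2.toNat) : Nat) : Int)
          else lcp) 0 ≤ (string.toList.length : Int) - j := by
      rcases hLatt with h0 | ⟨j2, hj2mem, hLeq⟩
      · omega
      · have := lcpL_le_left (string.toList.drop j.toNat) (string.toList.drop j2.toNat)
        rw [List.length_drop] at this
        omega
    set L := starts.foldl (fun lcp j2 =>
          if ((lcpL (string.toList.drop j.toNat) (string.toList.drop j2.toNat) : Nat) : Int) > lcp
          then ((lcpL (string.toList.drop j.toNat) (string.toList.drop j2.toNat) : Nat) : Int)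
          else lcp) 0 with hLdef
    have hstepB : stepB string A0 (acc, starts) j
        = ((PySem.List.pyRange (j + L + 1) ((string.toList.length : Int) + 1)).foldl
            (fun ac k => if PySem.Set.contains (PySem.Set.ofList A0) (W string j k) then ac
              else ac ++ [W string j k]) acc,
           starts ++ [j]) := by
      unfold stepB
      rw [if_neg (by rw [hcf]; simp)]
      dsimp only
      rw [nn, hLrw]
    have hchar : ∀ k : Int, j + L < k → k ≤ (string.toList.length : Int) →
        (W string j k ∈ acc ↔ W string j k ∈ A0) := by
      intro k hk1 hk2
      constructor
      · intro hmem
        rcases hsub _ hmem with h | ⟨j2, hj2mem, k2, hk21, hk22, heq⟩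
        · exact h
        · exfalso
          have hj2 := (hstarts j2 hj2mem).1
          have hlcp := le_lcp_of_W_eq string j j2 k k2 hj0 hj2 (by omega) hk2 hk21 hk22 heq
          have := hLge j2 hj2mem
          omega
      · exact hA0 _
    have hsplit : kfoldA string j acc
        = (PySem.List.pyRange (j + L + 1) ((string.toList.length : Int) + 1)).foldl
            (fun ac k => if ac.contains (W string j k) then ac else ac ++ [W string j k])
            ((PySem.List.pyRange (j + 1) (j + L + 1)).foldl
              (fun ac k => if ac.contains (W string j k) then ac else ac ++ [W string j k]) acc) := by
      rw [kdef, PySem.List.pyRange_one_append (j + 1) (j + L + 1)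
            ((string.toList.length : Int) + 1) (by omega) (by omega), List.foldl_append]
    have hphase1 : (PySem.List.pyRange (j + 1) (j + L + 1)).foldl
        (fun ac k => if ac.contains (W string j k) then ac else ac ++ [W string j k]) acc = acc := by
      apply foldl_fix
      intro k hk
      have hkr := (PySem.List.mem_pyRange_one).1 hk
      rcases hLatt with h0 | ⟨j2, hj2mem, hLeq⟩
      · omega
      · have hj2 := (hstarts j2 hj2mem).1
        have hWeq : W string j k = W string j2 (j2 + (k - j)) :=
          W_eq_of_le_lcp string j j2 k hj0 hj2 (by omega) (by omega)
        have hmem2 : W string j2 (j2 + (k - j)) ∈ acc := by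
          apply (hstarts j2 hj2mem).2.2
          · omega
          · have := lcpL_le_right (string.toList.drop j.toNat) (string.toList.drop j2.toNat)
            rw [List.length_drop] at this
            have hj2n := (hstarts j2 hj2mem).2.1
            omega
        rw [if_pos (by simp [List.contains_eq_mem]; rw [hWeq]; exact hmem2)]
    have hph2 := phase2 string A0 acc j L hchar hj0 hL0 (j + L + 1) (by omega) [] (by simp)
    simp only [List.append_nil] at hph2
    have heq1 : kfoldA string j acc = (stepB string A0 (acc, starts) j).1 := by
      rw [hsplit, hphase1, hph2, hstepB]
      rw [show (fun (ac : List String) (k : Int) =>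
            if PySem.Set.contains (PySem.Set.ofList A0) (W string j k) then ac
            else ac ++ [W string j k])
          = (fun (ac : List String) (k : Int) =>
            if !(PySem.Set.contains (PySem.Set.ofList A0) (W string j k)) then ac ++ [W string j k]
            else ac) from by
        funext ac k
        rw [ite_not_bool]]
      rw [PySem.List.foldl_append_if, PySem.List.foldl_append_if, List.nil_append]
    refine ⟨heq1, ?_⟩
    rw [hstepB]
    refine ⟨?_, ?_, ?_⟩
    · intro w hw
      rw [kdef]
      exact foldCA_mono _ _ _ _ (hA0 w hw)
    · intro w hw
      rw [kdef] at hw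
      rcases foldCA_sub _ _ _ _ hw with h | ⟨k, hk, rfl⟩
      · rcases hsub w h with h | ⟨j2, hm, k2, p1, p2, p3⟩
        · exact Or.inl h
        · exact Or.inr ⟨j2, List.mem_append_left _ hm, k2, p1, p2, p3⟩
      · have hkr := (PySem.List.mem_pyRange_one).1 hk
        exact Or.inr ⟨j, List.mem_append_right _ (by simp), k, by omega, by omega, rfl⟩
    · intro j2 hm
      rcases List.mem_append.1 hm with hm | hm
      · exact ⟨(hstarts j2 hm).1, (hstarts j2 hm).2.1,
          fun k hk1 hk2 => by
            rw [kdef]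
            exact foldCA_mono _ _ _ _ ((hstarts j2 hm).2.2 k hk1 hk2)⟩
      · have hj2eq : j2 = j := by simpa using hm
        subst hj2eq
        refine ⟨hj0, hjn, fun k hk1 hk2 => ?_⟩
        rw [kdef]
        exact foldCA_adds _ _ k ((PySem.List.mem_pyRange_one).2 ⟨by omega, by omega⟩) acc

-- fold the simulation over a list of valid positions
lemma simInner (string : String) (A0 : List String) (ps : List Int)
    (hps : ∀ j ∈ ps, 0 ≤ j ∧ j < (string.toList.length : Int)) :
    ∀ (acc : List String) (starts : List Int), SimInv string A0 acc starts →
      ps.foldl (fun a j => kfoldA string j a) acc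
          = (ps.foldl (stepB string A0) (acc, starts)).1
        ∧ SimInv string A0 (ps.foldl (fun a j => kfoldA string j a) acc)
            (ps.foldl (stepB string A0) (acc, starts)).2 := by
  induction ps with
  | nil => intro acc starts h; exact ⟨rfl, h⟩
  | cons j t ih =>
    intro acc starts h
    have hj := hps j (by simp)
    obtain ⟨h1, h2⟩ := stepSim string A0 acc starts j h hj.1 hj.2
    have hp : stepB string A0 (acc, starts) j
        = (kfoldA string j acc, (stepB string A0 (acc, starts) j).2) := by rw [h1]
    simp only [List.foldl_cons]
    rw [hp]
    exact ih (fun j' hj' => hps j' (by simp [hj'])) (kfoldA string j acc) _ h2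

-- positions produced by posList are in range
lemma posList_mem (c : Char) (s : List Char) : ∀ (a j : Int), j ∈ posList c s a →
    a ≤ j ∧ j < a + (s.length : Int) := by
  induction s with
  | nil => intro a j h; simp [posList] at h
  | cons x t ih =>
    intro a j h
    simp only [posList] at h
    split at h
    · rcases List.mem_cons.1 h with rfl | h
      · simp only [List.length_cons]; push_cast; omega
      · have := ih (a + 1) j h
        simp only [List.length_cons] at this ⊢; push_cast at this ⊢; omega
    · have := ih (a + 1) j h
      simp only [List.length_cons] at this ⊢; push_cast at this ⊢; omega

-- ===== VERDICT (by name: the statement is the Claim_ definition above) =====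
theorem emitter_spec : Claim_equal_emitter := by
  intro alpha string A0 _
  unfold Spec_emitter
  rw [emitter_eq, emitter_alt_eq]
  suffices h : ∀ (acc : List String) (starts : List Int), SimInv string A0 acc starts →
      alpha.toList.foldl (fun acc ch =>
          (posList ch string.toList 0).foldl (fun acc j => kfoldA string j acc) acc) acc
        = (alpha.toList.foldl (fun st ch =>
            (posList ch string.toList 0).foldl (stepB string A0) st) (acc, starts)).1 by
    apply h
    refine ⟨fun w hw => hw, fun w hw => Or.inl hw, by simp⟩
  induction alpha.toList with
  | nil => intro acc starts _; rfl
  | cons c t ih =>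
    intro acc starts h
    simp only [List.foldl_cons]
    have hmem : ∀ j ∈ posList c string.toList 0, 0 ≤ j ∧ j < (string.toList.length : Int) := by
      intro j hj
      have := posList_mem c string.toList 0 j hj
      omega
    obtain ⟨h1, h2⟩ := simInner string A0 (posList c string.toList 0) hmem acc starts h
    have hp : (posList c string.toList 0).foldl (stepB string A0) (acc, starts)
        = ((posList c string.toList 0).foldl (fun a j => kfoldA string j a) acc,
           ((posList c string.toList 0).foldl (stepB string A0) (acc, starts)).2) := by rw [h1]
    rw [hp]
    exact ih _ _ h2
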